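-- pv_equiv track=rewrite | github.com/jayak0776/Accenture-Reinprep-Problems-Codes | RienPrep/P35PizzaParty.py | pizzParty
-- ===== SOURCE A (Python) =====
-- def pizzParty(x,y):
--     s=0
--     while x%y!=0:
--         y+=1
--     y=str(y)
--     for i in y:
--         s+=int(i)
--     return s
-- ===== SOURCE B (Python) =====
-- def pizzParty(x, y):
--     # divisor search over i..sqrt(n) instead of scanning y upward one by one
--     n = abs(x)
--     best = y if n == 0 else None
--     i = 1
--     while i * i <= n:
--         if n % i == 0:
--             if i >= y and (best is None or i < best):
--                 best = i
--             j = n // i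
--             if j >= y and (best is None or j < best):
--                 best = j
--         i += 1
--     return sum(int(c) for c in str(best))
-- ===== Notes on version B (the rewrite author's own statement) =====
-- stated objective: alternative
-- what changed: B enumerates divisor pairs (i, n//i) of |x| for i up to sqrt(|x|) and takes the smallest divisor >= y, instead of A's linear upward scan of y until it divides x; the digit sum is then taken the same way.
import Mathlib
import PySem

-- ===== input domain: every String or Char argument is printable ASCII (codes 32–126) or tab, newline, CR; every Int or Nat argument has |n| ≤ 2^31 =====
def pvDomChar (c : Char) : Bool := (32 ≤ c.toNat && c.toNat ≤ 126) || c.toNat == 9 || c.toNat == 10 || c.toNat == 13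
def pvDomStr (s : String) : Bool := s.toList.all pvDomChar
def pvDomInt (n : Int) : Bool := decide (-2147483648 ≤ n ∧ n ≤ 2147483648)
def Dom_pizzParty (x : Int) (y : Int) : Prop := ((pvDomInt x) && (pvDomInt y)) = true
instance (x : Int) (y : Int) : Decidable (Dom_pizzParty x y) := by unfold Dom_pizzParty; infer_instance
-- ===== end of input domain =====

-- B replaces A's linear upward scan for a divisor by an enumeration of divisor
-- pairs (i, n // i) of |x| for i up to sqrt(|x|) (objective: alternative algorithm).

-- ===== PORT A =====
-- s = 0; for i in str(z): s += int(i)   (shared verbatim by both Pythons' final line)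
def pyDigitSum (z : Int) : Int :=
  (PySem.Int.toChars z).foldl (fun s c => s + (PySem.Int.ofChars? [c]).getD 0) 0

-- while x % y != 0: y += 1   (fuel only totalizes; under Pre_ it never runs out)
def pizzLoopA (fuel : Nat) (x : Int) (y : Int) : Int :=
  match fuel with
  | 0 => y
  | f + 1 => if PySem.Int.mod x y ≠ 0 then pizzLoopA f x (y + 1) else y

def pizzParty (x : Int) (y : Int) : Int :=
  pyDigitSum (pizzLoopA (x.natAbs + 1) x y)

-- ===== PORT B =====
-- if c >= y and (best is None or c < best): best = c
def bUpd (y : Int) (best : Option Int) (c : Int) : Option Int :=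
  if y ≤ c ∧ (best = none ∨ c < best.getD 0) then some c else best

-- while i*i <= n: if n % i == 0: best = upd (upd best i) (n // i); i += 1
def bLoop (fuel : Nat) (n : Int) (y : Int) (i : Int) (best : Option Int) : Option Int :=
  match fuel with
  | 0 => best
  | f + 1 =>
    if i * i ≤ n then
      bLoop f n y (i + 1)
        (if PySem.Int.mod n i = 0 then bUpd y (bUpd y best i) (PySem.Int.floordiv n i) else best)
    else best

def pizzParty_alt (x : Int) (y : Int) : Int :=
  let n : Int := (x.natAbs : Int)
  match bLoop (x.natAbs + 1) n y 1 (if n = 0 then some y else none) with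
  | some z => pyDigitSum z
  | none => 0   -- Python raises here (str(None)); outside Pre_

-- ===== PRECONDITION & SPEC =====
-- A returns exactly here: y ≤ 0 ends in int('-')/ZeroDivision errors, and
-- x ≠ 0 with y > |x| loops forever.
def Pre_pizzParty (x : Int) (y : Int) : Prop := 1 ≤ y ∧ (x = 0 ∨ y ≤ (x.natAbs : Int))
instance (x : Int) (y : Int) : Decidable (Pre_pizzParty x y) := by unfold Pre_pizzParty; infer_instance
def pvWitness_pizzParty : Int × Int := (12, 5)

def Spec_pizzParty (x : Int) (y : Int) (out : Int) : Prop := out = pizzParty_alt x y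
instance (x : Int) (y : Int) (out : Int) : Decidable (Spec_pizzParty x y out) := by unfold Spec_pizzParty; infer_instance

-- ===== CLAIM (what is proved, stated in full; the proofs are below) =====
def Claim_equal_pizzParty : Prop := ∀ (x : Int) (y : Int), Dom_pizzParty x y → Pre_pizzParty x y → Spec_pizzParty x y (pizzParty x y)

-- ===== LEMMAS AND PROOFS =====

-- A's loop returns the least z ≥ y with x % z == 0.
lemma pizzLoopA_spec (f : Nat) (x : Int) : ∀ (y : Int), 1 ≤ y → (x = 0 ∨ y ≤ (x.natAbs : Int)) →
    (x.natAbs : Int) ≤ y + f →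
    PySem.Int.mod x (pizzLoopA f x y) = 0 ∧ y ≤ pizzLoopA f x y ∧
      (∀ d, y ≤ d → d < pizzLoopA f x y → PySem.Int.mod x d ≠ 0) := by
  induction f with
  | zero =>
    intro y hy hpre hf
    simp only [pizzLoopA]
    refine ⟨?_, le_refl _, fun d h1 h2 => absurd (lt_of_le_of_lt h1 h2) (lt_irrefl _)⟩
    rw [PySem.Int.mod_eq_zero_iff_dvd]
    rcases hpre with h0 | hle
    · simp [h0]
    · have : y = (x.natAbs : Int) := le_antisymm hle (by omega)
      rw [this]; exact Int.natAbs_dvd.mpr dvd_rfl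
  | succ f ih =>
    intro y hy hpre hf
    simp only [pizzLoopA]
    by_cases h : PySem.Int.mod x y = 0
    · rw [if_neg (by simp [h])]
      exact ⟨h, le_refl _, fun d h1 h2 => absurd (lt_of_le_of_lt h1 h2) (lt_irrefl _)⟩
    · rw [if_pos h]
      have hx0 : x ≠ 0 := by
        intro h0
        exact h (by rw [PySem.Int.mod_eq_zero_iff_dvd, h0]; exact dvd_zero y)
      have hyx : y ≤ (x.natAbs : Int) := by
        rcases hpre with h0 | hle
        · exact absurd h0 hx0
        · exact hle
      have hyne : y ≠ (x.natAbs : Int) := by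
        intro he
        exact h (by rw [PySem.Int.mod_eq_zero_iff_dvd, he]; exact Int.natAbs_dvd.mpr dvd_rfl)
      have hrec := ih (y + 1) (by omega) (Or.inr (by omega)) (by omega)
      refine ⟨hrec.1, by omega, fun d h1 h2 => ?_⟩
      rcases eq_or_lt_of_le h1 with he | hlt
      · rw [← he]; exact h
      · exact hrec.2.2 d (by omega) h2

-- bUpd: every result is either the candidate (when admissible) or the old best
lemma bUpd_cases (y : Int) (best : Option Int) (c : Int) (z : Int)
    (h : bUpd y best c = some z) : (z = c ∧ y ≤ c) ∨ best = some z := by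
  unfold bUpd at h
  split at h
  · rename_i hc; injection h with h; exact Or.inl ⟨h.symm, hc.1⟩
  · exact Or.inr h

-- bUpd never loses a known bound: if best is some z, the result is some w ≤ z
lemma bUpd_mono (y : Int) (best : Option Int) (c : Int) (z : Int)
    (h : best = some z) : ∃ w, bUpd y best c = some w ∧ w ≤ z := by
  unfold bUpd
  subst h
  split
  · rename_i hc
    rcases hc.2 with h0 | hlt
    · simp at h0
    · exact ⟨c, rfl, le_of_lt (by simpa using hlt)⟩
  · exact ⟨z, rfl, le_refl z⟩

-- bUpd on an admissible candidate yields some w ≤ c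
lemma bUpd_hit (y : Int) (best : Option Int) (c : Int) (hc : y ≤ c) :
    ∃ w, bUpd y best c = some w ∧ w ≤ c := by
  unfold bUpd
  cases best with
  | none => simp [hc]
  | some z =>
    by_cases hlt : c < z
    · simp [hc, hlt]
    · have : ¬ (y ≤ c ∧ (some z = none ∨ c < (some z).getD 0)) := by simp; omega
      simp only [this, if_false]
      exact ⟨z, rfl, by omega⟩

-- B's loop invariant: best holds only divisors ≥ y, and is ≤ every divisor
-- d ≥ y whose pair (d, e) has a member below the counter i.
def BInv (n y i : Int) (best : Option Int) : Prop :=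
  (∀ z, best = some z → z ∣ n ∧ y ≤ z) ∧
    (∀ d e, d * e = n → 0 < d → 0 < e → y ≤ d → (d < i ∨ e < i) →
      ∃ z, best = some z ∧ z ≤ d)

lemma pair_seen (n i d e : Int) (hde : d * e = n) (hd : 0 < d) (he : 0 < e)
    (hi : 0 < i) (hn : n < i * i) : d < i ∨ e < i := by
  rcases le_total d e with h | h
  · left; nlinarith
  · right; nlinarith

lemma bLoop_spec (n y : Int) (hn : 0 < n) (hy : 1 ≤ y) :
    ∀ (f : Nat) (i : Int) (best : Option Int), 0 < i → n < i + f → BInv n y i best →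
    (∀ z, bLoop f n y i best = some z → z ∣ n ∧ y ≤ z) ∧
      (∀ d e, d * e = n → 0 < d → 0 < e → y ≤ d →
        ∃ z, bLoop f n y i best = some z ∧ z ≤ d) := by
  intro f
  induction f with
  | zero =>
    intro i best hi hf hinv
    simp only [bLoop]
    refine ⟨hinv.1, fun d e hde hd he hyd => ?_⟩
    have hni : n < i := by omega
    exact hinv.2 d e hde hd he hyd (pair_seen n i d e hde hd he hi (by nlinarith))
  | succ f ih =>
    intro i best hi hf hinv
    simp only [bLoop]
    by_cases hii : i * i ≤ n
    · simp only [hii, if_true]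
      refine ih (i + 1) _ (by omega) (by omega) ?_
      by_cases hdvd : PySem.Int.mod n i = 0
      · simp only [hdvd, if_true]
        have hidvd : i ∣ n := (PySem.Int.mod_eq_zero_iff_dvd n i).mp hdvd
        have hq : PySem.Int.floordiv n i = n / i :=
          PySem.Int.floordiv_eq_ediv_of_pos hi
        have hqi : (n / i) * i = n := Int.ediv_mul_cancel hidvd
        have hqpos : 0 < n / i := by
          rcases lt_trichotomy (n / i) 0 with h | h | h
          · nlinarith
          · rw [h] at hqi; omega
          · exact h
        constructor
        · intro z hz
          rw [hq] at hz
          rcases bUpd_cases y _ _ z hz with ⟨hze, hyz⟩ | hz'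
          · subst hze; exact ⟨⟨i, hqi.symm⟩, hyz⟩
          rcases bUpd_cases y _ _ z hz' with ⟨hze, hyz⟩ | hz''
          · subst hze; exact ⟨hidvd, hyz⟩
          · exact hinv.1 z hz''
        · intro d e hde hd he hyd hseen
          by_cases hold : d < i ∨ e < i
          · obtain ⟨z, hz, hzd⟩ := hinv.2 d e hde hd he hyd hold
            obtain ⟨w1, hw1, hw1z⟩ := bUpd_mono y best i z hz
            obtain ⟨w2, hw2, hw2z⟩ := bUpd_mono y _ (PySem.Int.floordiv n i) w1 hw1
            exact ⟨w2, by rw [hw2], by omega⟩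
          · push Not at hold
            rcases hseen with hdi | hei
            · -- d = i
              have hdi' : d = i := by omega
              obtain ⟨w1, hw1, hw1i⟩ := bUpd_hit y best i (hdi' ▸ hyd)
              obtain ⟨w2, hw2, hw2w⟩ := bUpd_mono y _ (PySem.Int.floordiv n i) w1 hw1
              exact ⟨w2, by rw [hw2], by omega⟩
            · -- e = i, so d = n / i
              have hei' : e = i := by omega
              have hdni : d = n / i := by
                have : d * i = n := by rw [← hei']; exact hde
                nlinarith
              obtain ⟨w, hw, hwc⟩ := bUpd_hit y (bUpd y best i) (PySem.Int.floordiv n i)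
                (by rw [hq, ← hdni]; exact hyd)
              rw [hq, ← hdni] at hwc
              exact ⟨w, by rw [hw], hwc⟩
      · simp only [hdvd, if_false]
        refine ⟨hinv.1, fun d e hde hd he hyd hseen => ?_⟩
        have hnotnew : d < i ∨ e < i := by
          by_contra hcon
          push Not at hcon
          rcases hseen with h1 | h1
          · have hdi : d = i := by omega
            exact hdvd ((PySem.Int.mod_eq_zero_iff_dvd n i).mpr ⟨e, by rw [← hde, hdi]⟩)
          · have hei : e = i := by omega
            exact hdvd ((PySem.Int.mod_eq_zero_iff_dvd n i).mpr ⟨d, by rw [← hde, hei, mul_comm]⟩)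
        exact hinv.2 d e hde hd he hyd hnotnew
    · simp only [hii, if_false]
      push Not at hii
      refine ⟨hinv.1, fun d e hde hd he hyd => ?_⟩
      exact hinv.2 d e hde hd he hyd (pair_seen n i d e hde hd he hi hii)

-- ===== VERDICT (by name: the statement is the Claim_ definition above) =====
theorem pizzParty_spec : Claim_equal_pizzParty := by
  intro x y _ hpre
  obtain ⟨hy, hpre2⟩ := hpre
  unfold Spec_pizzParty pizzParty pizzParty_alt
  by_cases hx : x = 0
  · subst hx
    norm_num [pizzLoopA, bLoop, PySem.Int.mod_eq_zero_iff_dvd]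
  · -- x ≠ 0: both sides compute the least divisor of |x| that is ≥ y
    have hnne : ¬ ((x.natAbs : Int) = 0) := by simpa using hx
    simp only [hnne, if_false]
    have hyx : y ≤ (x.natAbs : Int) := by
      rcases hpre2 with h | h
      · exact absurd h hx
      · exact h
    have hn : (0 : Int) < (x.natAbs : Int) := by
      have := Int.natAbs_pos.mpr hx; exact_mod_cast this
    set n : Int := (x.natAbs : Int) with hndef
    have hA := pizzLoopA_spec (x.natAbs + 1) x y hy hpre2 (by push_cast; omega)
    set r := pizzLoopA (x.natAbs + 1) x y with hrdef
    obtain ⟨hrdvd, hyr, hrmin⟩ := hA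
    have hrdvd' : r ∣ n := Int.dvd_natAbs.mpr ((PySem.Int.mod_eq_zero_iff_dvd x r).mp hrdvd)
    have hrpos : 0 < r := by omega
    have hre : r * (n / r) = n := Int.mul_ediv_cancel' hrdvd'
    have hepos : 0 < n / r := by nlinarith
    have hinv0 : BInv n y 1 none := by
      constructor
      · intro z hz; simp at hz
      · intro d e _ hd he _ hseen; omega
    have hB := bLoop_spec n y hn hy (x.natAbs + 1) 1 none (by omega) (by omega) hinv0
    obtain ⟨z, hz, hzr⟩ := hB.2 r (n / r) hre hrpos hepos hyr
    have hzprop := hB.1 z hz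
    have hzx : PySem.Int.mod x z = 0 :=
      (PySem.Int.mod_eq_zero_iff_dvd x z).mpr (Int.dvd_natAbs.mp hzprop.1)
    have hzr' : z = r := by
      rcases eq_or_lt_of_le hzr with h | h
      · exact h
      · exact absurd hzx (hrmin z hzprop.2 h)
    rw [hz, hzr']
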